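-- pv_equiv track=rewrite | github.com/Isa3324/RA2-1 | src/parser.py | estadoNumero
-- ===== SOURCE A (Python) =====
-- token_Num = "NUM" #  numeros reais
--
-- token_Invalido = "INVALIDO" # nao é aceito
--
-- def estadoNumero(linha,posicao):
--     inicio = posicao
--     ponto = False
--
--     while posicao < len(linha):
--         if linha[posicao].isdigit():
--             posicao += 1
--
--         elif linha[posicao] == '.':
--             if ponto:
--                 while posicao < len(linha) and (linha[posicao].isdigit() or linha[posicao] == '.'):
--                     posicao += 1
--                 return posicao, (token_Invalido, linha[inicio:posicao], inicio)
--
--             ponto = True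
--             posicao += 1
--
--             if posicao >= len(linha) or not linha[posicao].isdigit():
--                 return posicao, (token_Invalido, linha[inicio:posicao], inicio)
--
--         else:
--             break
--
--     numero = linha[inicio:posicao]
--     return posicao, (token_Num, numero, inicio)
-- ===== SOURCE B (Python) =====
-- token_Num = "NUM"
-- token_Invalido = "INVALIDO"
--
-- def estadoNumero(linha, posicao):
--     # phase parser: integer digits, optional '.' + fraction digits, second-dot => INVALIDO
--     inicio = posicao
--     n = len(linha)
--     while posicao < n and linha[posicao].isdigit():
--         posicao += 1
--     if posicao < n and linha[posicao] == '.':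
--         posicao += 1
--         if posicao >= n or not linha[posicao].isdigit():
--             return posicao, (token_Invalido, linha[inicio:posicao], inicio)
--         while posicao < n and linha[posicao].isdigit():
--             posicao += 1
--         if posicao < n and linha[posicao] == '.':
--             while posicao < n and (linha[posicao].isdigit() or linha[posicao] == '.'):
--                 posicao += 1
--             return posicao, (token_Invalido, linha[inicio:posicao], inicio)
--     return posicao, (token_Num, linha[inicio:posicao], inicio)
-- ===== Notes on version B (the rewrite author's own statement) =====
-- stated objective: alternative
-- what changed: Replaces A's single while loop driven by a 'ponto' boolean flag (with the second-dot and dot-validation logic nested inside it) by a flag-free sequential phase parser: skip integer digits, then handle an optional dot plus fractional digits, then a trailing second-dot garbage phase.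
-- outside the precondition, e.g. on estadoNumero('abc', -5): A raises IndexError, B raises IndexError
import Mathlib
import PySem

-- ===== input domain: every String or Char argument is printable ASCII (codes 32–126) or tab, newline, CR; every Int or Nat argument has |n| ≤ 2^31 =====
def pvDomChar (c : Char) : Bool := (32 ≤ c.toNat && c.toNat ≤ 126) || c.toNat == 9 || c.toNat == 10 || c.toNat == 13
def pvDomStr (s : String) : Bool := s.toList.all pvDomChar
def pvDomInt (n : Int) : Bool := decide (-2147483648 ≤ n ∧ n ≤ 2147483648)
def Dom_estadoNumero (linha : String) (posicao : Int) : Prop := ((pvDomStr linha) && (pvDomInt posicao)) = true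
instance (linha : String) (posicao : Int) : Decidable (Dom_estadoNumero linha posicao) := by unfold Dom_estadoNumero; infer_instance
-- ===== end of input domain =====

-- B replaces A's flag-driven single while loop by a sequential phase parser (integer part,
-- optional dot+fraction, trailing second-dot garbage); equivalence of return values on all
-- inputs where A does not raise IndexError (i.e. posicao ≥ -len(linha)).

-- ===== PORT A =====
-- inner 'while … (isdigit or '.')' loop of A (runs when a second dot is seen)
def pvLoopDotsA (linha : String) (pos : Int) : Int :=
  if _h : pos < (PySem.Str.len linha : Int) then
    match PySem.Str.pyGet? linha pos with
    | none => pos   -- IndexError in Python; unreachable under Pre_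
    | some c =>
      if PySem.Chars.isdigit c || c == '.' then pvLoopDotsA linha (pos + 1) else pos
  else pos
termination_by ((PySem.Str.len linha : Int) - pos).toNat
decreasing_by omega

-- A's main while loop, state = (posicao, ponto)
def pvLoopA (linha : String) (inicio : Int) (pos : Int) (ponto : Bool) :
    Int × (String × String × Int) :=
  if _h : pos < (PySem.Str.len linha : Int) then
    match PySem.Str.pyGet? linha pos with
    | none => (pos, ("INVALIDO", "", inicio))   -- IndexError in Python; unreachable under Pre_
    | some c =>
      if PySem.Chars.isdigit c then pvLoopA linha inicio (pos + 1) ponto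
      else if c == '.' then
        if ponto then
          let p := pvLoopDotsA linha pos
          (p, ("INVALIDO", PySem.Str.slice linha (some inicio) (some p), inicio))
        else
          if _h2 : pos + 1 ≥ (PySem.Str.len linha : Int) then
            (pos + 1, ("INVALIDO", PySem.Str.slice linha (some inicio) (some (pos + 1)), inicio))
          else
            match PySem.Str.pyGet? linha (pos + 1) with
            | none => (pos + 1, ("INVALIDO", "", inicio))   -- IndexError; unreachable under Pre_
            | some c2 =>
              if PySem.Chars.isdigit c2 then pvLoopA linha inicio (pos + 1) true
              else (pos + 1, ("INVALIDO", PySem.Str.slice linha (some inicio) (some (pos + 1)), inicio))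
      else (pos, ("NUM", PySem.Str.slice linha (some inicio) (some pos), inicio))
  else (pos, ("NUM", PySem.Str.slice linha (some inicio) (some pos), inicio))
termination_by ((PySem.Str.len linha : Int) - pos).toNat
decreasing_by all_goals omega

def estadoNumero (linha : String) (posicao : Int) : Int × (String × String × Int) :=
  pvLoopA linha posicao posicao false

-- ===== PORT B =====
-- 'while posicao < n and linha[posicao].isdigit()'
def pvSkipDigits (linha : String) (pos : Int) : Int :=
  if _h : pos < (PySem.Str.len linha : Int) then
    match PySem.Str.pyGet? linha pos with
    | none => pos   -- IndexError in Python; unreachable under Pre_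
    | some c => if PySem.Chars.isdigit c then pvSkipDigits linha (pos + 1) else pos
  else pos
termination_by ((PySem.Str.len linha : Int) - pos).toNat
decreasing_by omega

-- 'while posicao < n and (linha[posicao].isdigit() or linha[posicao] == '.')'
def pvSkipDigitsDots (linha : String) (pos : Int) : Int :=
  if _h : pos < (PySem.Str.len linha : Int) then
    match PySem.Str.pyGet? linha pos with
    | none => pos   -- IndexError in Python; unreachable under Pre_
    | some c =>
      if PySem.Chars.isdigit c || c == '.' then pvSkipDigitsDots linha (pos + 1) else pos
  else pos
termination_by ((PySem.Str.len linha : Int) - pos).toNat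
decreasing_by omega

-- 'posicao < n and linha[posicao] == '.''  (pyGet? is none when pos ≥ n, so the short-circuit is kept)
def pvDotAt (linha : String) (pos : Int) : Bool :=
  pos < (PySem.Str.len linha : Int) &&
    (match PySem.Str.pyGet? linha pos with | some c => c == '.' | none => false)

-- 'posicao < n and linha[posicao].isdigit()' as a test
def pvDigitAt (linha : String) (pos : Int) : Bool :=
  pos < (PySem.Str.len linha : Int) &&
    (match PySem.Str.pyGet? linha pos with | some c => PySem.Chars.isdigit c | none => false)

-- B after the fractional digits: second dot ⇒ consume digits/dots, INVALIDO; else NUM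
def pvAfterFrac (linha : String) (inicio p3 : Int) : Int × (String × String × Int) :=
  if pvDotAt linha p3 then
    let p4 := pvSkipDigitsDots linha p3
    (p4, ("INVALIDO", PySem.Str.slice linha (some inicio) (some p4), inicio))
  else (p3, ("NUM", PySem.Str.slice linha (some inicio) (some p3), inicio))

-- B after the integer part (p1 = position after the integer digits)
def pvAfterInt (linha : String) (inicio p1 : Int) : Int × (String × String × Int) :=
  if pvDotAt linha p1 then
    if !pvDigitAt linha (p1 + 1) then
      (p1 + 1, ("INVALIDO", PySem.Str.slice linha (some inicio) (some (p1 + 1)), inicio))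
    else
      pvAfterFrac linha inicio (pvSkipDigits linha (p1 + 1))
  else (p1, ("NUM", PySem.Str.slice linha (some inicio) (some p1), inicio))

def estadoNumero_alt (linha : String) (posicao : Int) : Int × (String × String × Int) :=
  pvAfterInt linha posicao (pvSkipDigits linha posicao)

-- ===== PRECONDITION & SPEC =====
-- Pre_ excludes exactly the inputs where Python A raises IndexError: posicao < -len(linha)
-- (the very first linha[posicao] is then out of range; B raises there too).
def Pre_estadoNumero (linha : String) (posicao : Int) : Prop :=
  -(PySem.Str.len linha : Int) ≤ posicao
instance (linha : String) (posicao : Int) : Decidable (Pre_estadoNumero linha posicao) := by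
  unfold Pre_estadoNumero; infer_instance

def pvWitness_estadoNumero : String × Int := ("12.5x", 0)

def Spec_estadoNumero (linha : String) (posicao : Int) (out : Int × (String × String × Int)) : Prop := out = estadoNumero_alt linha posicao
instance (linha : String) (posicao : Int) (out : Int × (String × String × Int)) : Decidable (Spec_estadoNumero linha posicao out) := by unfold Spec_estadoNumero; infer_instance

-- ===== CLAIM (what is proved, stated in full; the proofs are below) =====
def Claim_equal_estadoNumero : Prop := ∀ (linha : String) (posicao : Int), Dom_estadoNumero linha posicao → Pre_estadoNumero linha posicao → Spec_estadoNumero linha posicao (estadoNumero linha posicao)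

-- ===== LEMMAS AND PROOFS =====

lemma pvLoopDotsA_eq (linha : String) (pos : Int) :
    pvLoopDotsA linha pos = pvSkipDigitsDots linha pos := by
  fun_induction pvLoopDotsA linha pos <;> rw [pvSkipDigitsDots] <;> simp_all

lemma pvGetNone_absurd (linha : String) (pos : Int) (h1 : pos < (PySem.Str.len linha : Int))
    (h2 : PySem.Str.pyGet? linha pos = none) (hp : -(PySem.Str.len linha : Int) ≤ pos) : False := by
  simp [PySem.List.pyGet?_eq_none_iff, PySem.Raise.InRange] at h2
  simp [PySem.Str.len_eq] at h1 hp
  omega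

lemma pvLoopA_true_eq (linha : String) (inicio : Int) (pos : Int)
    (hp : -(PySem.Str.len linha : Int) ≤ pos) :
    pvLoopA linha inicio pos true = pvAfterFrac linha inicio (pvSkipDigits linha pos) := by
  revert hp
  fun_induction pvSkipDigits linha pos
  case case1 pos h hget =>
    intro hp; exact absurd (pvGetNone_absurd linha pos h hget hp) not_false
  case case2 pos h c hget hd ih =>
    intro hp
    rw [pvLoopA]
    simp only [h, dif_pos, hget, hd, if_pos]
    exact ih (by omega)
  case case3 pos h c hget hd =>
    intro hp
    rw [pvLoopA, pvAfterFrac, pvDotAt]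
    simp only [PySem.Str.pyGet?_eq, PySem.Chars.pyGet?_eq_listPyGet?] at hget
    simp only [PySem.Str.len_eq, String.length_toList] at h
    by_cases hc : c = '.'
    · subst hc; simp [hget, hd, h, pvLoopDotsA_eq]
    · simp [hget, hd, hc, h]
  case case4 pos h =>
    intro hp
    rw [pvLoopA, pvAfterFrac, pvDotAt]
    simp only [PySem.Str.len_eq, String.length_toList] at h
    simp [h]

lemma pvLoopA_false_eq (linha : String) (inicio : Int) (pos : Int)
    (hp : -(PySem.Str.len linha : Int) ≤ pos) :
    pvLoopA linha inicio pos false = pvAfterInt linha inicio (pvSkipDigits linha pos) := by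
  revert hp
  fun_induction pvSkipDigits linha pos
  case case1 pos h hget =>
    intro hp; exact absurd (pvGetNone_absurd linha pos h hget hp) not_false
  case case2 pos h c hget hd ih =>
    intro hp
    rw [pvLoopA]
    simp only [h, dif_pos, hget, hd, if_pos]
    exact ih (by omega)
  case case3 pos h c hget hd =>
    intro hp
    rw [pvLoopA, pvAfterInt, pvDotAt, pvDigitAt]
    simp only [PySem.Str.pyGet?_eq, PySem.Chars.pyGet?_eq_listPyGet?] at hget
    simp only [PySem.Str.len_eq, String.length_toList] at h hp
    by_cases hc : c = '.'
    · subst hc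
      by_cases h2 : pos + 1 < (linha.length : Int)
      · rcases hg2 : PySem.Str.pyGet? linha (pos + 1) with _ | c2
        · exact absurd (pvGetNone_absurd linha (pos + 1)
            (by simp [PySem.Str.len_eq]; omega) hg2 (by simp [PySem.Str.len_eq]; omega)) not_false
        · simp only [PySem.Str.pyGet?_eq, PySem.Chars.pyGet?_eq_listPyGet?] at hg2
          by_cases hd2 : PySem.Chars.isdigit c2
          · have ht := pvLoopA_true_eq linha inicio (pos + 1) (by simp [PySem.Str.len_eq]; omega)
            simp [hget, hd, h, h2, hd2, ht]
          · simp [hget, hd, h, h2, hd2]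
      · simp [hget, hd, h, h2]
    · simp [hget, hd, hc, h]
  case case4 pos h =>
    intro hp
    rw [pvLoopA, pvAfterInt, pvDotAt]
    simp only [PySem.Str.len_eq, String.length_toList] at h
    simp [h]

-- ===== VERDICT (by name: the statement is the Claim_ definition above) =====
theorem estadoNumero_spec : Claim_equal_estadoNumero := by
  intro linha posicao _ hpre
  unfold Spec_estadoNumero estadoNumero estadoNumero_alt
  exact pvLoopA_false_eq linha posicao posicao hpre
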